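-- pv_equiv track=rewrite | github.com/Ujjwal-Ruhal/100DaysOfPythonProblems | day-19/F8_count_prime_composite_digits.py | count_prime_composite
-- ===== SOURCE A (Python) =====
-- import math
--
-- def is_prime(number):
--     if number <= 1:
--         return False
--     for i in range(2, int(math.sqrt(number)) + 1):
--         if number % i == 0:
--             return False
--     return True
--
-- def count_prime_composite(n):
--     n = abs(n)
--     prime_count, composite_count = 0, 0
--     prime_digits, composite_digits = [], []
--
--     while n > 0:
--         digit = n % 10
--
--         if digit > 1:  # ignore 0 and 1
--             if is_prime(digit):
--                 prime_count += 1
--                 prime_digits.append(digit)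
--             else:
--                 composite_count += 1
--                 composite_digits.append(digit)
--
--         n //= 10  # ← VERY IMPORTANT: inside loop
--
--     return prime_count, composite_count, prime_digits, composite_digits
-- ===== SOURCE B (Python) =====
-- def count_prime_composite(n):
--     digits = []
--     m = abs(n)
--     while m > 0:
--         digits.append(m % 10)
--         m //= 10
--     prime_digits = [d for d in digits if d in (2, 3, 5, 7)]
--     composite_digits = [d for d in digits if d in (4, 6, 8, 9)]
--     return len(prime_digits), len(composite_digits), prime_digits, composite_digits
-- ===== Notes on version B (the rewrite author's own statement) =====
-- stated objective: simpler
-- what changed: Replaced A's single classify-as-you-go while loop with four accumulators and a trial-division is_prime helper by a two-phase pipeline: extract the LSB-first digit list once, then two membership filters against the fixed prime-digit and composite-digit sets, returning the filters' lengths as the counts.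
import Mathlib
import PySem

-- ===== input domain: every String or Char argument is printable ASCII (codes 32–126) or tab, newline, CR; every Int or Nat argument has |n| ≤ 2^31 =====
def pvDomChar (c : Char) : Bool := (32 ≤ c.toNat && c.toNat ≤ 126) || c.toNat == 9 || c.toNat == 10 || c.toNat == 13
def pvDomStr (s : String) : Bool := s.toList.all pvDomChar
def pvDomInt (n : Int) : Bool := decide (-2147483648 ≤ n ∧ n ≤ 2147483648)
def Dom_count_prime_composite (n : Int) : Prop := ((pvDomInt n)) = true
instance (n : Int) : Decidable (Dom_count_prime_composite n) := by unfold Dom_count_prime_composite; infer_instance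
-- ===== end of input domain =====

-- B replaces the classify-as-you-go loop with trial-division primality by: extract the digit
-- list once, then two membership filters against the fixed digit sets {2,3,5,7}/{4,6,8,9}
-- (objective: simpler).


-- ===== PORT A =====
-- int(math.sqrt(number)) ported by hand as an exact floor square root (transparent fold);
-- this agrees with math.sqrt on every nonnegative int reached here (single digits 2..9).
def isqrt (n : Nat) : Nat :=
  (List.range (n + 1)).foldl (fun a k => if k * k ≤ n then k else a) 0

def is_prime (number : Int) : Bool :=
  if number ≤ 1 then false
  else
    -- 'for i in range(2, int(math.sqrt(number)) + 1): if number % i == 0: return False'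
    (PySem.List.pyRange 2 ((isqrt number.toNat : Int) + 1) 1).all
      (fun i => !(PySem.Int.mod number i == 0))

-- the while-loop of A, with its four accumulators
def cpcLoop (n pc cc : Int) (pd cd : List Int) : Int × Int × List Int × List Int :=
  if _h : n > 0 then
    let digit := PySem.Int.mod n 10
    if digit > 1 then
      if is_prime digit then
        cpcLoop (PySem.Int.floordiv n 10) (pc + 1) cc (pd ++ [digit]) cd
      else
        cpcLoop (PySem.Int.floordiv n 10) pc (cc + 1) pd (cd ++ [digit])
    else cpcLoop (PySem.Int.floordiv n 10) pc cc pd cd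
  else (pc, cc, pd, cd)
termination_by n.toNat
decreasing_by
  all_goals
    rw [PySem.Int.floordiv_eq_ediv_of_pos (by omega)]
    omega

def count_prime_composite (n : Int) : Int × Int × List Int × List Int :=
  cpcLoop |n| 0 0 [] []

-- ===== PORT B =====
-- the digit-extraction while-loop of B
def digitsLoop (m : Int) (acc : List Int) : List Int :=
  if _h : m > 0 then digitsLoop (PySem.Int.floordiv m 10) (acc ++ [PySem.Int.mod m 10])
  else acc
termination_by m.toNat
decreasing_by
  rw [PySem.Int.floordiv_eq_ediv_of_pos (by omega)]
  omega

def count_prime_composite_alt (n : Int) : Int × Int × List Int × List Int :=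
  let digits := digitsLoop |n| []
  let prime_digits := digits.filter (fun d => ([2, 3, 5, 7] : List Int).contains d)
  let composite_digits := digits.filter (fun d => ([4, 6, 8, 9] : List Int).contains d)
  (PySem.List.len prime_digits, PySem.List.len composite_digits, prime_digits, composite_digits)

-- ===== PRECONDITION & SPEC =====
def Spec_count_prime_composite (n : Int) (out : Int × Int × List Int × List Int) : Prop := out = count_prime_composite_alt n
instance (n : Int) (out : Int × Int × List Int × List Int) : Decidable (Spec_count_prime_composite n out) := by unfold Spec_count_prime_composite; infer_instance

-- ===== CLAIM (what is proved, stated in full; the proofs are below) =====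
def Claim_equal_count_prime_composite : Prop := ∀ (n : Int), Dom_count_prime_composite n → Spec_count_prime_composite n (count_prime_composite n)

-- ===== LEMMAS AND PROOFS =====

-- pure least-significant-first digit list of a natural number
def dgs (m : Nat) : List Int :=
  if m = 0 then [] else ((m % 10 : Nat) : Int) :: dgs (m / 10)
decreasing_by omega

lemma cast_floordiv (m : Nat) : PySem.Int.floordiv (m : Int) 10 = ((m / 10 : Nat) : Int) := by
  exact_mod_cast PySem.Int.floordiv_natCast m 10

lemma cast_mod (m : Nat) : PySem.Int.mod (m : Int) 10 = ((m % 10 : Nat) : Int) := by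
  exact_mod_cast PySem.Int.mod_natCast m 10

lemma digitsLoop_natCast (m : Nat) (acc : List Int) :
    digitsLoop (m : Int) acc = acc ++ dgs m := by
  induction m using Nat.strong_induction_on generalizing acc with
  | _ m ih =>
    rw [digitsLoop, dgs]
    by_cases h0 : m = 0
    · simp [h0]
    · have hpos : (m : Int) > 0 := by omega
      simp only [hpos, dif_pos, cast_floordiv, cast_mod]
      rw [ih (m / 10) (by omega), if_neg h0]
      simp

-- digit classification: for d < 10, the >1/is_prime branches are exactly the two membership tests
lemma classify (d : Nat) (hd : d < 10) :
    (((d : Int) > 1 ∧ is_prime (d : Int) = true) ↔ ([2, 3, 5, 7] : List Int).contains (d : Int) = true)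
    ∧ (((d : Int) > 1 ∧ is_prime (d : Int) = false) ↔ ([4, 6, 8, 9] : List Int).contains (d : Int) = true) := by
  revert hd
  revert d
  decide

lemma cpcLoop_natCast (m : Nat) (pc cc : Int) (pd cd : List Int) :
    cpcLoop (m : Int) pc cc pd cd =
      (pc + ((dgs m).filter (fun d => ([2, 3, 5, 7] : List Int).contains d)).length,
       cc + ((dgs m).filter (fun d => ([4, 6, 8, 9] : List Int).contains d)).length,
       pd ++ (dgs m).filter (fun d => ([2, 3, 5, 7] : List Int).contains d),
       cd ++ (dgs m).filter (fun d => ([4, 6, 8, 9] : List Int).contains d)) := by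
  induction m using Nat.strong_induction_on generalizing pc cc pd cd with
  | _ m ih =>
    rw [cpcLoop, dgs]
    by_cases h0 : m = 0
    · simp [h0]
    · have hpos : (m : Int) > 0 := by omega
      have hc := classify (m % 10) (by omega)
      simp only [hpos, dif_pos, cast_floordiv, cast_mod, if_neg h0]
      rw [List.filter_cons, List.filter_cons]
      by_cases h1 : ((m % 10 : Nat) : Int) > 1
      · by_cases hp : is_prime ((m % 10 : Nat) : Int) = true
        · have hmem : ([2, 3, 5, 7] : List Int).contains ((m % 10 : Nat) : Int) = true :=
            hc.1.mp ⟨h1, hp⟩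
          have hnmem : ([4, 6, 8, 9] : List Int).contains ((m % 10 : Nat) : Int) = false := by
            by_contra hx
            have h2 := (hc.2.mpr (by rwa [Bool.not_eq_false] at hx)).2
            rw [hp] at h2
            cases h2
          rw [if_pos h1, if_pos hp, ih (m / 10) (by omega), hmem, hnmem]
          simp only [if_true, Bool.false_eq_true, if_false, List.length_cons, Prod.mk.injEq]
          exact ⟨by push_cast; ring, trivial, by simp, trivial⟩
        · have hpf : is_prime ((m % 10 : Nat) : Int) = false := by simpa using hp
          have hmem : ([4, 6, 8, 9] : List Int).contains ((m % 10 : Nat) : Int) = true :=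
            hc.2.mp ⟨h1, hpf⟩
          have hnmem : ([2, 3, 5, 7] : List Int).contains ((m % 10 : Nat) : Int) = false := by
            by_contra hx
            have h2 := (hc.1.mpr (by rwa [Bool.not_eq_false] at hx)).2
            rw [hpf] at h2
            cases h2
          rw [if_pos h1, if_neg hp, ih (m / 10) (by omega), hmem, hnmem]
          simp only [if_true, Bool.false_eq_true, if_false, List.length_cons, Prod.mk.injEq]
          exact ⟨trivial, by push_cast; ring, trivial, by simp⟩
      · have hnm1 : ([2, 3, 5, 7] : List Int).contains ((m % 10 : Nat) : Int) = false := by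
          by_contra hx
          exact h1 (hc.1.mpr (by rwa [Bool.not_eq_false] at hx)).1
        have hnm2 : ([4, 6, 8, 9] : List Int).contains ((m % 10 : Nat) : Int) = false := by
          by_contra hx
          exact h1 (hc.2.mpr (by rwa [Bool.not_eq_false] at hx)).1
        rw [if_neg h1, ih (m / 10) (by omega), hnm1, hnm2]
        simp

-- ===== VERDICT (by name: the statement is the Claim_ definition above) =====
theorem count_prime_composite_spec : Claim_equal_count_prime_composite := by
  intro n _
  unfold Spec_count_prime_composite count_prime_composite count_prime_composite_alt
  have habs : |n| = ((n.natAbs : Nat) : Int) := Int.abs_eq_natAbs n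
  rw [habs, cpcLoop_natCast, digitsLoop_natCast]
  simp [PySem.List.len]
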